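-- pv_equiv track=rewrite | github.com/DvirLehrer/cropper | src/lighting_normalization.py | _expand_mask_2px
-- ===== SOURCE A (Python) =====
-- def _expand_mask_2px(mask: list[bool], width: int, height: int) -> list[bool]:
--     out = list(mask)
--     for y in range(height):
--         row = y * width
--         for x in range(width):
--             i = row + x
--             if not mask[i]:
--                 continue
--             for ny in range(y - 2, y + 3):
--                 if ny < 0 or ny >= height:
--                     continue
--                 nrow = ny * width
--                 for nx in range(x - 2, x + 3):
--                     if nx < 0 or nx >= width:
--                         continue
--                     out[nrow + nx] = True
--     return out
-- ===== SOURCE B (Python) =====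
-- def _expand_mask_2px(mask: list[bool], width: int, height: int) -> list[bool]:
--     # Separable 5x5 box dilation: a horizontal 5-wide window pass into a temp
--     # buffer, then a vertical 5-tall window pass into the output buffer.
--     temp = list(mask)
--     for y in range(height):
--         row = y * width
--         for x in range(width):
--             temp[row + x] = any(mask[row + k]
--                                 for k in range(max(x - 2, 0), min(x + 3, width)))
--     out = list(temp)
--     for y in range(height):
--         row = y * width
--         for x in range(width):
--             out[row + x] = any(temp[k * width + x]
--                                for k in range(max(y - 2, 0), min(y + 3, height)))
--     return out
-- ===== Notes on version B (the rewrite author's own statement) =====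
-- stated objective: alternative
-- what changed: Replaces A's per-set-pixel stamping of the whole 5x5 neighbourhood by a separable box dilation: a horizontal 5-wide window pass into a temp buffer followed by a vertical 5-tall window pass; Pre_ only excludes inputs where A raises IndexError (positive grid larger than the mask).
import Mathlib
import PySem

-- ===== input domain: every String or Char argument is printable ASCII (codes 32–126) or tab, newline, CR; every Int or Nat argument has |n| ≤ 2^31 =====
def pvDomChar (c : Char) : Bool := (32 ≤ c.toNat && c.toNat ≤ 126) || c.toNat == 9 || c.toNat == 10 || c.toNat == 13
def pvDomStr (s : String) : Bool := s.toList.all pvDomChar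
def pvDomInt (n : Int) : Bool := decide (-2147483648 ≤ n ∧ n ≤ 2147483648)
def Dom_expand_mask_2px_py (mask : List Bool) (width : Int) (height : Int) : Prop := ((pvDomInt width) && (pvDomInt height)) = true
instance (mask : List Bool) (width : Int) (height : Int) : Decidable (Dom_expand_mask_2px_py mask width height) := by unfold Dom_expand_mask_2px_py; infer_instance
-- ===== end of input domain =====

-- B replaces A's write-out of a full 5x5 neighbourhood per set pixel by a separable
-- box dilation (a horizontal 5-wide window pass into a temp buffer, then a vertical
-- 5-tall window pass); objective: alternative decomposition of the same dilation.

-- ===== PORT A =====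
-- literal transliteration of A; `out[nrow+nx] = True` is `List.set` on the (in-range,
-- nonnegative under the guards) index, `mask[i]` is `pyGet?` (none only off-Pre_).
def expand_mask_2px_py (mask : List Bool) (width : Int) (height : Int) : List Bool :=
  (PySem.List.pyRange 0 height 1).foldl (fun out y =>
    let row := y * width
    (PySem.List.pyRange 0 width 1).foldl (fun out x =>
      let i := row + x
      if ((PySem.List.pyGet? mask i).getD false) = false then out
      else
        (PySem.List.pyRange (y - 2) (y + 3) 1).foldl (fun out ny =>
          if ny < 0 ∨ height ≤ ny then out
          else
            let nrow := ny * width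
            (PySem.List.pyRange (x - 2) (x + 3) 1).foldl (fun out nx =>
              if nx < 0 ∨ width ≤ nx then out
              else out.set (nrow + nx).toNat true) out) out) out) mask

-- ===== PORT B =====
-- literal transliteration of Source B: copy mask into temp, horizontal window pass writing
-- temp, copy temp into out, vertical window pass writing out; `buf[row+x] = any(...)`
-- is `List.set` on the (in-range, nonnegative under Pre_) index.
def expand_mask_2px_py_alt (mask : List Bool) (width : Int) (height : Int) : List Bool :=
  let temp := (PySem.List.pyRange 0 height 1).foldl (fun temp y =>
    let row := y * width
    (PySem.List.pyRange 0 width 1).foldl (fun temp x =>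
      temp.set (row + x).toNat
        ((PySem.List.pyRange (max (x - 2) 0) (min (x + 3) width) 1).any
          (fun k => (PySem.List.pyGet? mask (row + k)).getD false))) temp) mask
  (PySem.List.pyRange 0 height 1).foldl (fun out y =>
    let row := y * width
    (PySem.List.pyRange 0 width 1).foldl (fun out x =>
      out.set (row + x).toNat
        ((PySem.List.pyRange (max (y - 2) 0) (min (y + 3) height) 1).any
          (fun k => (PySem.List.pyGet? temp (k * width + x)).getD false))) out) temp

-- ===== PRECONDITION & SPEC =====
-- Pre_ excludes exactly the inputs where A raises IndexError: a positive grid larger than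
-- the mask (A then reads mask[i] for every grid index and runs past the end).
def Pre_expand_mask_2px_py (mask : List Bool) (width : Int) (height : Int) : Prop :=
  width ≤ 0 ∨ height ≤ 0 ∨ width * height ≤ (mask.length : Int)
instance (mask : List Bool) (width : Int) (height : Int) : Decidable (Pre_expand_mask_2px_py mask width height) := by unfold Pre_expand_mask_2px_py; infer_instance
def pvWitness_expand_mask_2px_py : List Bool × Int × Int := ([true, false, false, false], 2, 2)
def Spec_expand_mask_2px_py (mask : List Bool) (width : Int) (height : Int) (out : List Bool) : Prop := out = expand_mask_2px_py_alt mask width height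
instance (mask : List Bool) (width : Int) (height : Int) (out : List Bool) : Decidable (Spec_expand_mask_2px_py mask width height out) := by unfold Spec_expand_mask_2px_py; infer_instance

-- ===== CLAIM (what is proved, stated in full; the proofs are below) =====
def Claim_equal_expand_mask_2px_py : Prop := ∀ (mask : List Bool) (width : Int) (height : Int), Dom_expand_mask_2px_py mask width height → Pre_expand_mask_2px_py mask width height → Spec_expand_mask_2px_py mask width height (expand_mask_2px_py mask width height)

-- ===== LEMMAS AND PROOFS =====

-- (o.set i true)[j]? keeps o[j]? except at j = i, where the stored bit becomes true.
lemma getElem?_set_true (o : List Bool) (i j : Nat) :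
    (o.set i true)[j]? = o[j]?.map (fun b => b || decide (i = j)) := by
  by_cases h : i = j
  · subst h
    by_cases hl : i < o.length
    · simp [hl]
    · have hle : o.length ≤ i := by omega
      have hle2 : (o.set i true).length ≤ i := by simp [hle]
      simp [List.getElem?_eq_none hle, List.getElem?_eq_none hle2]
  · rw [List.getElem?_set_ne h]
    cases o[j]? <;> simp [h]

-- A fold whose body only ORs fixed positions to true: pointwise characterisation.
lemma foldl_or_set {α : Type} (f : List Bool → α → List Bool) (p : α → Nat → Bool)
    (hf : ∀ o e j, (f o e)[j]? = o[j]?.map (fun b => b || p e j)) :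
    ∀ (L : List α) (o : List Bool) (j : Nat),
      (L.foldl f o)[j]? = o[j]?.map (fun b => b || L.any (fun e => p e j)) := by
  intro L
  induction L with
  | nil => intro o j; cases h : o[j]? <;> simp [h]
  | cons e L ih =>
    intro o j
    rw [List.foldl_cons, ih, hf]
    cases h : o[j]? <;> simp [h, Bool.or_assoc]


-- ----- pointwise characterisation of port A -----

-- the OR of A's four nested loops, seen from output position j
def pA (mask : List Bool) (w h : Int) (j : Nat) : Bool :=
  (PySem.List.pyRange 0 h 1).any fun y =>
    (PySem.List.pyRange 0 w 1).any fun x =>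
      (PySem.List.pyGet? mask (y * w + x)).getD false &&
      ((PySem.List.pyRange (y - 2) (y + 3) 1).any fun ny =>
        (!decide (ny < 0 ∨ h ≤ ny)) &&
        ((PySem.List.pyRange (x - 2) (x + 3) 1).any fun nx =>
          (!decide (nx < 0 ∨ w ≤ nx)) && decide ((ny * w + nx).toNat = j)))

lemma lvl1 (w : Int) (ny x : Int) (o : List Bool) (j : Nat) :
    ((PySem.List.pyRange (x - 2) (x + 3) 1).foldl
      (fun out nx => if nx < 0 ∨ w ≤ nx then out else out.set (ny * w + nx).toNat true) o)[j]?
    = o[j]?.map (fun b => b ||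
        ((PySem.List.pyRange (x - 2) (x + 3) 1).any fun nx =>
          (!decide (nx < 0 ∨ w ≤ nx)) && decide ((ny * w + nx).toNat = j))) := by
  refine foldl_or_set _ (fun nx j => (!decide (nx < 0 ∨ w ≤ nx)) && decide ((ny * w + nx).toNat = j)) ?_ _ _ _
  intro o nx j
  by_cases hc : nx < 0 ∨ w ≤ nx
  · cases h : o[j]? <;> simp [hc, h]
  · rw [if_neg hc, getElem?_set_true]
    cases h : o[j]? <;> simp [hc, h]

lemma lvl2 (w h : Int) (y x : Int) (o : List Bool) (j : Nat) :
    ((PySem.List.pyRange (y - 2) (y + 3) 1).foldl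
      (fun out ny => if ny < 0 ∨ h ≤ ny then out else
        (PySem.List.pyRange (x - 2) (x + 3) 1).foldl
          (fun out nx => if nx < 0 ∨ w ≤ nx then out else out.set (ny * w + nx).toNat true) out) o)[j]?
    = o[j]?.map (fun b => b ||
        ((PySem.List.pyRange (y - 2) (y + 3) 1).any fun ny =>
          (!decide (ny < 0 ∨ h ≤ ny)) &&
          ((PySem.List.pyRange (x - 2) (x + 3) 1).any fun nx =>
            (!decide (nx < 0 ∨ w ≤ nx)) && decide ((ny * w + nx).toNat = j)))) := by
  refine foldl_or_set _ (fun ny j => (!decide (ny < 0 ∨ h ≤ ny)) &&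
      ((PySem.List.pyRange (x - 2) (x + 3) 1).any fun nx =>
        (!decide (nx < 0 ∨ w ≤ nx)) && decide ((ny * w + nx).toNat = j))) ?_ _ _ _
  intro o ny j
  by_cases hc : ny < 0 ∨ h ≤ ny
  · cases h : o[j]? <;> simp [hc, h]
  · rw [if_neg hc, lvl1]
    cases h : o[j]? <;> simp [hc, h]

lemma lvl3 (mask : List Bool) (w h : Int) (y : Int) (o : List Bool) (j : Nat) :
    ((PySem.List.pyRange 0 w 1).foldl
      (fun out x =>
        if ((PySem.List.pyGet? mask (y * w + x)).getD false) = false then out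
        else
          (PySem.List.pyRange (y - 2) (y + 3) 1).foldl
            (fun out ny => if ny < 0 ∨ h ≤ ny then out else
              (PySem.List.pyRange (x - 2) (x + 3) 1).foldl
                (fun out nx => if nx < 0 ∨ w ≤ nx then out else out.set (ny * w + nx).toNat true) out) out) o)[j]?
    = o[j]?.map (fun b => b ||
        ((PySem.List.pyRange 0 w 1).any fun x =>
          (PySem.List.pyGet? mask (y * w + x)).getD false &&
          ((PySem.List.pyRange (y - 2) (y + 3) 1).any fun ny =>
            (!decide (ny < 0 ∨ h ≤ ny)) &&
            ((PySem.List.pyRange (x - 2) (x + 3) 1).any fun nx =>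
              (!decide (nx < 0 ∨ w ≤ nx)) && decide ((ny * w + nx).toNat = j))))) := by
  refine foldl_or_set _ (fun x j => (PySem.List.pyGet? mask (y * w + x)).getD false &&
      ((PySem.List.pyRange (y - 2) (y + 3) 1).any fun ny =>
        (!decide (ny < 0 ∨ h ≤ ny)) &&
        ((PySem.List.pyRange (x - 2) (x + 3) 1).any fun nx =>
          (!decide (nx < 0 ∨ w ≤ nx)) && decide ((ny * w + nx).toNat = j)))) ?_ _ _ _
  intro o x j
  by_cases hb : ((PySem.List.pyGet? mask (y * w + x)).getD false) = false
  · cases h : o[j]? <;> simp [hb, h]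
  · rw [if_neg hb, lvl2]
    cases h : o[j]? <;> simp [Bool.of_not_eq_false hb, h]

lemma portA_get (mask : List Bool) (w h : Int) (j : Nat) :
    (expand_mask_2px_py mask w h)[j]? = mask[j]?.map (fun b => b || pA mask w h j) := by
  unfold expand_mask_2px_py pA
  refine foldl_or_set _ (fun y j => (PySem.List.pyRange 0 w 1).any fun x =>
      (PySem.List.pyGet? mask (y * w + x)).getD false &&
      ((PySem.List.pyRange (y - 2) (y + 3) 1).any fun ny =>
        (!decide (ny < 0 ∨ h ≤ ny)) &&
        ((PySem.List.pyRange (x - 2) (x + 3) 1).any fun nx =>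
          (!decide (nx < 0 ∨ w ≤ nx)) && decide ((ny * w + nx).toNat = j)))) ?_ _ _ _
  intro o y j
  exact lvl3 mask w h y o j


-- ----- grid (flatMap of equal-length rows) lemmas -----

lemma length_flatMap_uniform {α β : Type} (L : List α) (f : α → List β) (w : Nat)
    (hf : ∀ a ∈ L, (f a).length = w) : (L.flatMap f).length = L.length * w := by
  induction L with
  | nil => simp
  | cons a L ih =>
    simp only [List.flatMap_cons, List.length_append, List.length_cons]
    rw [ih (fun b hb => hf b (List.mem_cons_of_mem a hb)), hf a (List.mem_cons_self)]
    ring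

lemma getElem?_flatMap_uniform {α β : Type} (L : List α) (f : α → List β) (w : Nat)
    (hf : ∀ a ∈ L, (f a).length = w) (i j : Nat) (hi : i < L.length) (hj : j < w) :
    (L.flatMap f)[i * w + j]? = (f (L[i]'hi))[j]? := by
  induction L generalizing i with
  | nil => simp at hi
  | cons a L ih =>
    cases i with
    | zero =>
      have ha : (f a).length = w := hf a (List.mem_cons_self)
      simp only [List.flatMap_cons, Nat.zero_mul, Nat.zero_add]
      rw [List.getElem?_append_left (by omega)]
      simp
    | succ i =>
      have ha : (f a).length = w := hf a (List.mem_cons_self)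
      simp only [List.flatMap_cons]
      rw [List.getElem?_append_right (by nlinarith)]
      have harith : (i + 1) * w + j - (f a).length = i * w + j := by
        rw [ha]; ring_nf; omega
      rw [harith, ih (fun b hb => hf b (List.mem_cons_of_mem a hb)) i (by simpa using hi)]
      simp

-- a row index and a column index determine the flat index uniquely
lemma cell_unique (w Y X ny nx : Int) (hX0 : 0 ≤ X) (hXw : X < w)
    (hnx0 : 0 ≤ nx) (hnxw : nx < w) (heq : ny * w + nx = Y * w + X) :
    ny = Y ∧ nx = X := by
  have hw : 0 < w := by omega
  rcases lt_trichotomy ny Y with hlt | heqy | hgt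
  · exfalso
    have h1 : (ny + 1) * w ≤ Y * w :=
      mul_le_mul_of_nonneg_right (by omega) (by omega)
    nlinarith
  · constructor
    · exact heqy
    · subst heqy; omega
  · exfalso
    have h1 : (Y + 1) * w ≤ ny * w :=
      mul_le_mul_of_nonneg_right (by omega) (by omega)
    nlinarith

lemma idx_toNat (w : Int) (hw : 0 < w) (k X : Int) (hk : 0 ≤ k) (hX : 0 ≤ X) :
    (k * w + X).toNat = k.toNat * w.toNat + X.toNat := by
  have : k * w + X = ((k.toNat * w.toNat + X.toNat : Nat) : Int) := by
    push_cast [Int.toNat_of_nonneg hk, Int.toNat_of_nonneg hX,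
      Int.toNat_of_nonneg (le_of_lt hw)]
    ring
  rw [this, Int.toNat_natCast]

lemma pA_out_of_grid (mask : List Bool) (w h : Int) (hw : 0 < w) (hh : 0 < h)
    (j : Nat) (hj : h.toNat * w.toNat ≤ j) : pA mask w h j = false := by
  rw [← Bool.not_eq_true, pA]
  intro hc
  simp only [List.any_eq_true, Bool.and_eq_true, PySem.List.mem_pyRange_one,
    decide_eq_true_eq, Bool.not_eq_true', decide_eq_false_iff_not] at hc
  obtain ⟨y, hy, x, hx, hbit, ny, hny, hgny, nx, hnx, hgnx, hidx⟩ := hc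
  push_neg at hgny hgnx
  have h1 : ny * w ≤ (h - 1) * w := mul_le_mul_of_nonneg_right (by omega) (by omega)
  have h2 : ny * w + nx < w * h := by nlinarith [hgnx.2]
  have h0 : 0 ≤ ny * w + nx := add_nonneg (mul_nonneg (by omega) (by omega)) (by omega)
  have hcast : ((h.toNat * w.toNat : Nat) : Int) = w * h := by
    push_cast [Int.toNat_of_nonneg (le_of_lt hw), Int.toNat_of_nonneg (le_of_lt hh)]
    ring
  generalize hm : ny * w + nx = m at h2 h0 hidx
  generalize hG : h.toNat * w.toNat = G at hcast hj
  generalize hg : w * h = g at h2 hcast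
  omega

-- on a degenerate grid A returns the plain copy
lemma portA_degenerate (mask : List Bool) (w h : Int) (hdeg : w ≤ 0 ∨ h ≤ 0) :
    expand_mask_2px_py mask w h = mask := by
  apply List.ext_getElem?
  intro j
  rw [portA_get]
  have hpA : pA mask w h j = false := by
    rcases hdeg with hw | hh
    · simp [pA, PySem.List.pyRange_one_eq_nil hw]
    · simp [pA, PySem.List.pyRange_one_eq_nil hh]
  rw [hpA]
  cases hm : mask[j]? <;> simp [hm]


-- ----- generic machinery for B's two write passes -----

-- a fold of identity steps does nothing
lemma foldl_id {α β : Type} (L : List α) (o : β) : L.foldl (fun t _ => t) o = o := by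
  induction L generalizing o with
  | nil => rfl
  | cons a L ih => simpa using ih o

-- any-congruence restricted to members
lemma any_congr_mem {α : Type} (L : List α) (p q : α → Bool)
    (h : ∀ a ∈ L, p a = q a) : L.any p = L.any q := by
  induction L with
  | nil => rfl
  | cons a L ih =>
    simp only [List.any_cons, h a (List.mem_cons_self),
      ih (fun b hb => h b (List.mem_cons_of_mem a hb))]

-- foldl-congruence restricted to members
lemma foldl_congr_mem' {α β : Type} (L : List α) (f g : β → α → β)
    (h : ∀ b a, a ∈ L → f b a = g b a) : ∀ o, L.foldl f o = L.foldl g o := by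
  induction L with
  | nil => intro o; rfl
  | cons a L ih =>
    intro o
    rw [List.foldl_cons, List.foldl_cons, h o a (List.mem_cons_self)]
    exact ih (fun b a' ha' => h b a' (List.mem_cons_of_mem a ha')) _

-- a fold that writes, at each index it touches, a value determined by that index alone
lemma foldl_set_fun {α : Type} (idx : α → Nat) (F : Nat → Bool) :
    ∀ (L : List α) (o : List Bool) (j : Nat), (∀ e ∈ L, idx e < o.length) →
      (L.foldl (fun t e => t.set (idx e) (F (idx e))) o)[j]? =
      if L.any (fun e => idx e == j) then some (F j) else o[j]? := by
  intro L
  induction L with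
  | nil => intro o j _; simp
  | cons e L ih =>
    intro o j hb
    rw [List.foldl_cons, ih _ j (fun e' he' => by
      simpa using hb e' (List.mem_cons_of_mem e he'))]
    by_cases hany : L.any (fun e' => idx e' == j) = true
    · simp [hany]
    · simp only [hany, if_false, List.any_cons, Bool.or_eq_true, beq_iff_eq]
      by_cases he : idx e = j
      · have hl : idx e < o.length := hb e (List.mem_cons_self)
        rw [List.getElem?_set]
        simp [he, hany, he ▸ hl]
      · rw [List.getElem?_set_ne he]
        simp [he, hany]

lemma grid_length (g : Int → Int → Bool) (w h : Int) :
    ((PySem.List.pyRange 0 h 1).flatMap (fun y => (PySem.List.pyRange 0 w 1).map (g y))).length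
    = h.toNat * w.toNat := by
  rw [length_flatMap_uniform _ _ w.toNat (by intro a _; simp [PySem.List.length_pyRange_one])]
  simp [PySem.List.length_pyRange_one]

lemma grid_get (g : Int → Int → Bool) (w h : Int) (Y X : Nat) (hY : Y < h.toNat) (hX : X < w.toNat) :
    ((PySem.List.pyRange 0 h 1).flatMap (fun y => (PySem.List.pyRange 0 w 1).map (g y)))[Y * w.toNat + X]?
    = some (g (Y : Int) (X : Int)) := by
  rw [getElem?_flatMap_uniform _ _ w.toNat (by intro a _; simp [PySem.List.length_pyRange_one])
      Y X (by simp [PySem.List.length_pyRange_one]; omega) hX]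
  rw [List.getElem?_map, PySem.List.getElem?_pyRange_one, PySem.List.getElem_pyRange_one]
  simp [hX]

-- the flattened list of grid coordinates
def gridP (w h : Int) : List (Int × Int) :=
  (PySem.List.pyRange 0 h 1).flatMap (fun y =>
    (PySem.List.pyRange 0 w 1).map (fun x => (y, x)))

lemma mem_gridP (w h : Int) (p : Int × Int) :
    p ∈ gridP w h ↔ (0 ≤ p.1 ∧ p.1 < h) ∧ (0 ≤ p.2 ∧ p.2 < w) := by
  cases p with
  | mk y x =>
    simp only [gridP, List.mem_flatMap, List.mem_map, PySem.List.mem_pyRange_one]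
    constructor
    · rintro ⟨y', hy', x', hx', heq⟩
      obtain ⟨h1, h2⟩ := Prod.mk.injEq .. ▸ heq
      cases heq
      exact ⟨hy', hx'⟩
    · rintro ⟨hy, hx⟩
      exact ⟨y, hy, x, hx, rfl⟩

-- the single write pass of port B, for a value function g of the coordinates:
-- it rewrites the grid prefix to the grid of g and keeps the tail
lemma bpass_eq (g : Int → Int → Bool) (w h : Int) (o : List Bool)
    (hw : 0 < w) (hh : 0 < h) (hlen : h.toNat * w.toNat ≤ o.length) :
    (PySem.List.pyRange 0 h 1).foldl (fun t y =>
      (PySem.List.pyRange 0 w 1).foldl (fun t x => t.set (y * w + x).toNat (g y x)) t) o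
    = ((PySem.List.pyRange 0 h 1).flatMap (fun y =>
        (PySem.List.pyRange 0 w 1).map (g y))) ++ o.drop (h.toNat * w.toNat) := by
  have hflat : (PySem.List.pyRange 0 h 1).foldl (fun t y =>
      (PySem.List.pyRange 0 w 1).foldl (fun t x => t.set (y * w + x).toNat (g y x)) t) o
      = (gridP w h).foldl (fun t p => t.set (p.1 * w + p.2).toNat (g p.1 p.2)) o := by
    unfold gridP
    rw [List.foldl_flatMap]
    refine (foldl_congr_mem' _ _ _ ?_ o).symm
    intro t y _
    rw [List.foldl_map]
  rw [hflat]
  -- the written value depends only on the flat index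
  set F : Nat → Bool := fun j => g ((j / w.toNat : Nat) : Int) ((j % w.toNat : Nat) : Int) with hF
  have hwn : 0 < w.toNat := by omega
  have hrw : (gridP w h).foldl (fun t p => t.set (p.1 * w + p.2).toNat (g p.1 p.2)) o
      = (gridP w h).foldl (fun t p => t.set (p.1 * w + p.2).toNat (F ((p.1 * w + p.2).toNat))) o := by
    refine foldl_congr_mem' _ _ _ ?_ o
    intro t p hp
    obtain ⟨⟨hy0, hyh⟩, ⟨hx0, hxw⟩⟩ := (mem_gridP w h p).1 hp
    have hidx : (p.1 * w + p.2).toNat = p.1.toNat * w.toNat + p.2.toNat :=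
      idx_toNat w hw _ _ hy0 hx0
    have hdiv : (p.1 * w + p.2).toNat / w.toNat = p.1.toNat := by
      rw [hidx, Nat.mul_comm, Nat.mul_add_div hwn, Nat.div_eq_of_lt (by omega), Nat.add_zero]
    have hmod : (p.1 * w + p.2).toNat % w.toNat = p.2.toNat := by
      rw [hidx, Nat.mul_add_mod', Nat.mod_eq_of_lt (by omega)]
    rw [hF]
    simp only [hdiv, hmod, Int.toNat_of_nonneg hy0, Int.toNat_of_nonneg hx0]
  rw [hrw]
  have hbound : ∀ p ∈ gridP w h, (p.1 * w + p.2).toNat < o.length := by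
    intro p hp
    obtain ⟨⟨hy0, hyh⟩, ⟨hx0, hxw⟩⟩ := (mem_gridP w h p).1 hp
    rw [idx_toNat w hw _ _ hy0 hx0]
    have : p.1.toNat * w.toNat + p.2.toNat < h.toNat * w.toNat := by
      have h1 : p.1.toNat + 1 ≤ h.toNat := by omega
      calc p.1.toNat * w.toNat + p.2.toNat < p.1.toNat * w.toNat + w.toNat := by omega
        _ = (p.1.toNat + 1) * w.toNat := by ring
        _ ≤ h.toNat * w.toNat := Nat.mul_le_mul_right _ h1
    omega
  apply List.ext_getElem?
  intro j
  rw [foldl_set_fun _ F _ o j hbound]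
  have hglen : ((PySem.List.pyRange 0 h 1).flatMap (fun y =>
      (PySem.List.pyRange 0 w 1).map (g y))).length = h.toNat * w.toNat := by
    rw [length_flatMap_uniform _ _ w.toNat (by intro a _; simp [PySem.List.length_pyRange_one])]
    simp [PySem.List.length_pyRange_one]
  by_cases hj : j < h.toNat * w.toNat
  · -- inside the grid: the pass wrote F j there
    have hany : (gridP w h).any (fun p => (p.1 * w + p.2).toNat == j) = true := by
      simp only [List.any_eq_true, beq_iff_eq]
      refine ⟨(((j / w.toNat : Nat) : Int), ((j % w.toNat : Nat) : Int)), ?_, ?_⟩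
      · rw [mem_gridP]
        refine ⟨⟨by positivity, ?_⟩, ⟨by positivity, ?_⟩⟩
        · have h1 : j / w.toNat < h.toNat := (Nat.div_lt_iff_lt_mul hwn).mpr (by omega)
          omega
        · have h1 : j % w.toNat < w.toNat := Nat.mod_lt _ hwn
          omega
      · rw [idx_toNat w hw _ _ (by positivity) (by positivity)]
        simp only [Int.toNat_natCast]
        rw [Nat.mul_comm]
        exact Nat.div_add_mod j w.toNat
    rw [if_pos hany, List.getElem?_append_left (by omega)]
    have hY : j / w.toNat < h.toNat := (Nat.div_lt_iff_lt_mul hwn).mpr (by omega)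
    have hX : j % w.toNat < w.toNat := Nat.mod_lt _ hwn
    have hYX : j / w.toNat * w.toNat + j % w.toNat = j := by
      rw [Nat.mul_comm]; exact Nat.div_add_mod j w.toNat
    have hr : ((PySem.List.pyRange 0 h 1).flatMap (fun y =>
        (PySem.List.pyRange 0 w 1).map (g y)))[j]?
        = some (g ((j / w.toNat : Nat) : Int) ((j % w.toNat : Nat) : Int)) := by
      conv_lhs => rw [← hYX]
      exact grid_get g w h _ _ hY hX
    rw [hr, hF]
  · -- beyond the grid: nothing was written
    have hany : (gridP w h).any (fun p => (p.1 * w + p.2).toNat == j) = false := by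
      rw [← Bool.not_eq_true]
      simp only [List.any_eq_true, beq_iff_eq, not_exists]
      rintro p ⟨hp, hpj⟩
      obtain ⟨⟨hy0, hyh⟩, ⟨hx0, hxw⟩⟩ := (mem_gridP w h p).1 hp
      have := hbound p hp
      have hlt : (p.1 * w + p.2).toNat < h.toNat * w.toNat := by
        rw [idx_toNat w hw _ _ hy0 hx0]
        have h1 : p.1.toNat + 1 ≤ h.toNat := by omega
        calc p.1.toNat * w.toNat + p.2.toNat < (p.1.toNat + 1) * w.toNat := by
              have : p.2.toNat < w.toNat := by omega
              nlinarith
          _ ≤ h.toNat * w.toNat := Nat.mul_le_mul_right _ h1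
      omega
    rw [hany]
    simp only [Bool.false_eq_true, if_false]
    rw [List.getElem?_append_right (by omega), hglen, List.getElem?_drop]
    congr 1
    omega


-- ----- named passes of port B (proof-only helpers) -----

def hpass (mask : List Bool) (w h : Int) : List Bool :=
  (PySem.List.pyRange 0 h 1).flatMap (fun y =>
    (PySem.List.pyRange 0 w 1).map (fun x =>
      (PySem.List.pyRange (max (x - 2) 0) (min (x + 3) w) 1).any
        (fun k => (PySem.List.pyGet? mask (y * w + k)).getD false)))

def vpass (temp : List Bool) (w h : Int) : List Bool :=
  (PySem.List.pyRange 0 h 1).flatMap (fun y =>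
    (PySem.List.pyRange 0 w 1).map (fun x =>
      (PySem.List.pyRange (max (y - 2) 0) (min (y + 3) h) 1).any
        (fun k => (PySem.List.pyGet? temp (k * w + x)).getD false)))

-- B's value: the two passes, grid prefix plus the untouched tail of mask
lemma portB_eq (mask : List Bool) (w h : Int) (hw : 0 < w) (hh : 0 < h)
    (hlen : h.toNat * w.toNat ≤ mask.length) :
    expand_mask_2px_py_alt mask w h
    = vpass (hpass mask w h) w h ++ mask.drop (h.toNat * w.toNat) := by
  unfold expand_mask_2px_py_alt
  rw [bpass_eq _ w h mask hw hh hlen]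
  have htemp : ((PySem.List.pyRange 0 h 1).flatMap (fun y =>
      (PySem.List.pyRange 0 w 1).map (fun x =>
        (PySem.List.pyRange (max (x - 2) 0) (min (x + 3) w) 1).any
          (fun k => (PySem.List.pyGet? mask (y * w + k)).getD false))))
      = hpass mask w h := rfl
  rw [htemp]
  set temp := hpass mask w h ++ mask.drop (h.toNat * w.toNat) with htempdef
  have hlen2 : h.toNat * w.toNat ≤ temp.length := by
    rw [htempdef, List.length_append]
    have : (hpass mask w h).length = h.toNat * w.toNat := grid_length _ w h
    omega
  rw [bpass_eq _ w h temp hw hh hlen2]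
  have hhl : (hpass mask w h).length = h.toNat * w.toNat := grid_length _ w h
  have hdrop : temp.drop (h.toNat * w.toNat) = mask.drop (h.toNat * w.toNat) := by
    rw [htempdef, ← hhl, List.drop_left]
  rw [hdrop]
  congr 1
  -- the vertical pass only reads temp inside the grid prefix, which is hpass
  unfold vpass
  refine List.flatMap_congr ?_
  intro y hy
  refine List.map_congr_left ?_
  intro x hx
  refine any_congr_mem _ _ _ ?_
  intro k hk
  rw [PySem.List.mem_pyRange_one] at hy hx hk
  have hk0 : 0 ≤ k := le_trans (le_max_right _ _) hk.1
  have hkh : k < h := lt_of_lt_of_le hk.2 (min_le_right _ _)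
  have hnn : 0 ≤ k * w + x := add_nonneg (mul_nonneg hk0 (by omega)) hx.1
  rw [PySem.List.pyGet?_of_nonneg _ hnn, PySem.List.pyGet?_of_nonneg _ hnn]
  have hidx : (k * w + x).toNat < h.toNat * w.toNat := by
    rw [idx_toNat w hw _ _ hk0 hx.1]
    have h1 : k.toNat + 1 ≤ h.toNat := by omega
    calc k.toNat * w.toNat + x.toNat < (k.toNat + 1) * w.toNat := by
          have : x.toNat < w.toNat := by omega
          nlinarith
      _ ≤ h.toNat * w.toNat := Nat.mul_le_mul_right _ h1
  rw [htempdef, List.getElem?_append_left (by omega)]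

-- on a degenerate grid B returns the plain copy
lemma portB_degenerate (mask : List Bool) (w h : Int) (hdeg : w ≤ 0 ∨ h ≤ 0) :
    expand_mask_2px_py_alt mask w h = mask := by
  unfold expand_mask_2px_py_alt
  rcases hdeg with hw | hh
  · simp only [PySem.List.pyRange_one_eq_nil hw, List.foldl_nil]
    rw [foldl_id, foldl_id]
  · simp [PySem.List.pyRange_one_eq_nil hh]

lemma hpass_lookup (mask : List Bool) (w h : Int) (hw : 0 < w) (hh : 0 < h)
    (k X : Int) (hk0 : 0 ≤ k) (hkh : k < h) (hX0 : 0 ≤ X) (hXw : X < w) :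
    (PySem.List.pyGet? (hpass mask w h) (k * w + X)).getD false
    = (PySem.List.pyRange (max (X - 2) 0) (min (X + 3) w) 1).any
        (fun k1 => (PySem.List.pyGet? mask (k * w + k1)).getD false) := by
  have hnn : 0 ≤ k * w + X := by positivity
  rw [PySem.List.pyGet?_of_nonneg _ hnn]
  have hidx : (k * w + X).toNat = k.toNat * w.toNat + X.toNat := by
    have : k * w + X = ((k.toNat * w.toNat + X.toNat : Nat) : Int) := by
      push_cast [Int.toNat_of_nonneg hk0, Int.toNat_of_nonneg hX0,
        Int.toNat_of_nonneg (le_of_lt hw)]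
      ring
    rw [this, Int.toNat_natCast]
  rw [hidx]
  unfold hpass
  rw [grid_get _ w h k.toNat X.toNat (by omega) (by omega)]
  simp [Int.toNat_of_nonneg hk0, Int.toNat_of_nonneg hX0]

lemma cell_equiv (mask : List Bool) (w h : Int) (hw : 0 < w) (hh : 0 < h)
    (Y X : Nat) (hY : Y < h.toNat) (hX : X < w.toNat)
    (hjl : Y * w.toNat + X < mask.length) :
    (mask[Y * w.toNat + X]'hjl || pA mask w h (Y * w.toNat + X))
    = (PySem.List.pyRange (max ((Y : Int) - 2) 0) (min ((Y : Int) + 3) h) 1).any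
        (fun k => (PySem.List.pyGet? (hpass mask w h) (k * w + (X : Int))).getD false) := by
  have hXi : (X : Int) < w := by omega
  have hYi : (Y : Int) < h := by omega
  rw [Bool.eq_iff_iff]
  simp only [List.any_eq_true, Bool.or_eq_true, Bool.and_eq_true,
    PySem.List.mem_pyRange_one, decide_eq_true_eq, Bool.not_eq_true',
    decide_eq_false_iff_not, pA]
  constructor
  · rintro (hbit | ⟨y, hy, x, hx, hb, ny, hny, hgny, nx, hnx, hgnx, hidx⟩)
    · -- the centre pixel itself is set
      refine ⟨(Y : Int), by constructor <;> omega, ?_⟩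
      rw [hpass_lookup mask w h hw hh _ _ (by omega) hYi (by omega) hXi]
      simp only [List.any_eq_true, PySem.List.mem_pyRange_one]
      refine ⟨(X : Int), by constructor <;> omega, ?_⟩
      rw [PySem.List.pyGet?_of_nonneg _ (by positivity),
        idx_toNat w hw _ _ (by omega) (by omega)]
      simp only [Int.toNat_natCast]
      rw [List.getElem?_eq_getElem hjl]
      simpa using hbit
    · -- a set pixel (y,x) wrote into cell (Y,X)
      push_neg at hgny hgnx
      have hnyx : ny = (Y : Int) ∧ nx = (X : Int) := by
        have h0 : 0 ≤ ny * w + nx :=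
          add_nonneg (mul_nonneg (by omega) (by omega)) (by omega)
        have hconv : ny * w + nx = (Y : Int) * w + (X : Int) := by
          have h1 : ((ny * w + nx).toNat : Int) = ny * w + nx := Int.toNat_of_nonneg h0
          have h2 : ((Y * w.toNat + X : Nat) : Int) = (Y : Int) * w + (X : Int) := by
            push_cast [Int.toNat_of_nonneg (le_of_lt hw)]
            ring
          rw [← h1, hidx, h2]
        exact cell_unique w (Y : Int) (X : Int) ny nx (by omega) hXi (by omega)
          (by omega) hconv
      obtain ⟨hnyY, hnxX⟩ := hnyx
      refine ⟨y, by constructor <;> omega, ?_⟩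
      rw [hpass_lookup mask w h hw hh _ _ (by omega) (by omega) (by omega) (by omega)]
      simp only [List.any_eq_true, PySem.List.mem_pyRange_one]
      exact ⟨x, by constructor <;> omega, hb⟩
  · rintro ⟨k, hk, hval⟩
    rw [hpass_lookup mask w h hw hh _ _ (by omega) (by omega) (by omega) hXi] at hval
    simp only [List.any_eq_true, PySem.List.mem_pyRange_one] at hval
    obtain ⟨k1, hk1, hbit⟩ := hval
    right
    refine ⟨k, by constructor <;> omega, k1, by constructor <;> omega, hbit,
      (Y : Int), by constructor <;> omega, by omega, (X : Int),
      by constructor <;> omega, by omega, ?_⟩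
    rw [idx_toNat w hw _ _ (by omega) (by omega)]
    simp

-- ===== VERDICT (by name: the statement is the Claim_ definition above) =====
theorem expand_mask_2px_py_spec : Claim_equal_expand_mask_2px_py := by
  intro mask w h _hdom hpre
  unfold Spec_expand_mask_2px_py
  by_cases hdeg : w ≤ 0 ∨ h ≤ 0
  · rw [portA_degenerate mask w h hdeg, portB_degenerate mask w h hdeg]
  · push_neg at hdeg
    obtain ⟨hw, hh⟩ := hdeg
    have hpre' : w * h ≤ (mask.length : Int) := by
      rcases hpre with h1 | h1 | h1
      · omega
      · omega
      · exact h1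
    have hcast : ((h.toNat * w.toNat : Nat) : Int) = w * h := by
      push_cast [Int.toNat_of_nonneg (le_of_lt hw), Int.toNat_of_nonneg (le_of_lt hh)]
      ring
    have hlen : h.toNat * w.toNat ≤ mask.length := by
      have h2 : ((h.toNat * w.toNat : Nat) : Int) ≤ (mask.length : Int) := by
        rw [hcast]; exact hpre'
      exact_mod_cast h2
    rw [portB_eq mask w h hw hh hlen]
    have hvlen : (vpass (hpass mask w h) w h).length = h.toNat * w.toNat := by
      unfold vpass; exact grid_length _ w h
    apply List.ext_getElem?
    intro j
    rw [portA_get]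
    by_cases hj : j < h.toNat * w.toNat
    · have hwpos : 0 < w.toNat := by omega
      have hYX : j / w.toNat * w.toNat + j % w.toNat = j := by
        rw [Nat.mul_comm]; exact Nat.div_add_mod j w.toNat
      have hX : j % w.toNat < w.toNat := Nat.mod_lt _ hwpos
      have hY : j / w.toNat < h.toNat := (Nat.div_lt_iff_lt_mul hwpos).mpr (by omega)
      have hjlen : j < mask.length := lt_of_lt_of_le hj hlen
      rw [List.getElem?_append_left (by rw [hvlen]; exact hj)]
      rw [← hYX]
      unfold vpass
      rw [grid_get _ w h (j / w.toNat) (j % w.toNat) hY hX]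
      rw [List.getElem?_eq_getElem (by rw [hYX]; exact hjlen)]
      simp only [Option.map_some]
      exact congrArg some (cell_equiv mask w h hw hh (j / w.toNat) (j % w.toNat) hY hX _)
    · have hout : (vpass (hpass mask w h) w h).length ≤ j := by rw [hvlen]; omega
      rw [List.getElem?_append_right hout, hvlen, List.getElem?_drop]
      rw [pA_out_of_grid mask w h hw hh j (by omega)]
      have harith : h.toNat * w.toNat + (j - h.toNat * w.toNat) = j := by omega
      rw [harith]
      cases hm : mask[j]? <;> simp [hm]
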